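-- pv_equiv track=rewrite | github.com/deep-privacy/SA-toolkit | satools/satools/kaldifeature.py | NumFrames
-- ===== SOURCE A (Python) =====
-- def FirstSampleOfFrame(frame:int, window_shift:int, window_size:int, snip_edges:bool):
--     frame_shift = window_shift
--     if snip_edges:
--         return frame * frame_shift
--     else:
--         midpoint_of_frame = frame_shift * frame + frame_shift // 2
--         beginning_of_frame = midpoint_of_frame - window_size // 2
--     return beginning_of_frame
--
-- def NumFrames(num_samples:int, window_shift:int, window_size:int, snip_edges:bool, flush:bool=True):
--     frame_shift = window_shift
--     frame_length = window_size
--     if snip_edges: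
--         if num_samples < frame_length:
--             return 0
--         else:
--             return 1 + ((num_samples - frame_length) // frame_shift)
--     else:
--         num_frames = (num_samples + (frame_shift // 2)) // frame_shift
--     if flush:
--         return num_frames
--
--     end_sample_of_last_frame = FirstSampleOfFrame(num_frames - 1, frame_shift, frame_length, snip_edges) + frame_length
--
--     while num_frames > 0 and end_sample_of_last_frame > num_samples:
--         num_frames -= 1
--         end_sample_of_last_frame -= frame_shift
--
--     return num_frames
-- ===== SOURCE B (Python) =====
-- def NumFrames(num_samples, window_shift, window_size, snip_edges, flush=True):
--     if snip_edges:
--         if num_samples < window_size: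
--             return 0
--         return 1 + (num_samples - window_size) // window_shift
--     num_frames = (num_samples + window_shift // 2) // window_shift
--     if flush:
--         return num_frames
--     # keep only the frames whose window lies within the signal, never fewer than zero
--     fit = 1 + (num_samples - window_size + window_size // 2 - window_shift // 2) // window_shift
--     return max(0, min(num_frames, fit))
-- ===== Notes on version B (the rewrite author's own statement) =====
-- stated objective: simpler
-- what changed: The non-flush trailing-frame while loop is replaced by closed-form arithmetic: count how many frame windows fit inside the signal by one floor division and clamp into [0, num_frames]; Pre_ excludes window_shift = 0 (ZeroDivisionError, except the snip_edges short-signal early return) and negative window_shift in the non-flush non-snip branch, since a frame shift is naturally a positive sample count.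
-- intended difference: On non-flush, non-snip inputs with num_samples + window_shift//2 < 0 (a negative sample count), A returns the negative base frame count while B returns 0, the intended value, since a frame count cannot be negative. — e.g. on NumFrames(-100, 10, 25, false, false): A returns -10, B returns 0
-- outside the precondition, e.g. on NumFrames(100, -10, 25, False, False): A returns -10, B returns 0; on NumFrames(-95, -10, 25, False, False): A returns 0, B returns 10
import Mathlib
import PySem

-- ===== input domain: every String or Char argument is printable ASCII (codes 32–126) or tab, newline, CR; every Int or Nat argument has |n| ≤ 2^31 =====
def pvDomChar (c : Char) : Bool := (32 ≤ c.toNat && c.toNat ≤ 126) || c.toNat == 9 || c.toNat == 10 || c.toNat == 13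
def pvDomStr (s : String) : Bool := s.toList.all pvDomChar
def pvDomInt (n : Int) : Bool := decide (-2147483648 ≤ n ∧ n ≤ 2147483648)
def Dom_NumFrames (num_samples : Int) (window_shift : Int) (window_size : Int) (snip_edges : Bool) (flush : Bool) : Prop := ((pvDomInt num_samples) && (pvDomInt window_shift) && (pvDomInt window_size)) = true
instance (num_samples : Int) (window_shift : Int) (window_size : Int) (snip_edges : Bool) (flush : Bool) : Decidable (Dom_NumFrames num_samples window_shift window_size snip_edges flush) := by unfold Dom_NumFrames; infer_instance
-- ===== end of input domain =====

-- B replaces A's trailing-frame while loop with closed-form arithmetic (simpler; no iteration).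

-- ===== PORT A =====
def FirstSampleOfFrame (frame : Int) (window_shift : Int) (window_size : Int) (snip_edges : Bool) : Int :=
  let frame_shift := window_shift
  if snip_edges then frame * frame_shift
  else
    let midpoint_of_frame := frame_shift * frame + PySem.Int.floordiv frame_shift 2
    let beginning_of_frame := midpoint_of_frame - PySem.Int.floordiv window_size 2
    beginning_of_frame

-- the while loop of A, fuel-bounded (each iteration decrements num_frames, so num_frames.toNat fuel suffices)
def NumFramesLoop (num_samples : Int) (frame_shift : Int) : Nat → Int → Int → Int
  | 0, n, _ => n
  | fuel+1, n, e =>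
    if n > 0 ∧ e > num_samples then NumFramesLoop num_samples frame_shift fuel (n - 1) (e - frame_shift)
    else n

def NumFrames (num_samples : Int) (window_shift : Int) (window_size : Int) (snip_edges : Bool) (flush : Bool) : Int :=
  let frame_shift := window_shift
  let frame_length := window_size
  if snip_edges then
    if num_samples < frame_length then 0
    else 1 + PySem.Int.floordiv (num_samples - frame_length) frame_shift
  else
    let num_frames := PySem.Int.floordiv (num_samples + PySem.Int.floordiv frame_shift 2) frame_shift
    if flush then num_frames
    else
      let end_sample_of_last_frame :=
        FirstSampleOfFrame (num_frames - 1) frame_shift frame_length snip_edges + frame_length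
      NumFramesLoop num_samples frame_shift num_frames.toNat num_frames end_sample_of_last_frame

-- ===== PORT B =====
def NumFrames_alt (num_samples : Int) (window_shift : Int) (window_size : Int) (snip_edges : Bool) (flush : Bool) : Int :=
  if snip_edges then
    if num_samples < window_size then 0
    else 1 + PySem.Int.floordiv (num_samples - window_size) window_shift
  else
    let num_frames := PySem.Int.floordiv (num_samples + PySem.Int.floordiv window_shift 2) window_shift
    if flush then num_frames
    else
      let fit := 1 + PySem.Int.floordiv
        (num_samples - window_size + PySem.Int.floordiv window_size 2 - PySem.Int.floordiv window_shift 2)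
        window_shift
      max 0 (min num_frames fit)

-- ===== PRECONDITION & SPEC =====
-- Pre_ excludes window_shift = 0, where A raises ZeroDivisionError (except the snip_edges
-- short-signal case that returns 0 before dividing), and negative window_shift in the
-- non-flush, non-snip branch: a frame shift is naturally a positive number of samples, and
-- A's trailing-frame loop behaviour under a negative shift is outside that natural domain.
def Pre_NumFrames (num_samples : Int) (window_shift : Int) (window_size : Int) (snip_edges : Bool) (flush : Bool) : Prop :=
  (window_shift ≠ 0 ∨ (snip_edges = true ∧ num_samples < window_size)) ∧
  (window_shift > 0 ∨ snip_edges = true ∨ flush = true)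
instance (num_samples : Int) (window_shift : Int) (window_size : Int) (snip_edges : Bool) (flush : Bool) : Decidable (Pre_NumFrames num_samples window_shift window_size snip_edges flush) := by unfold Pre_NumFrames; infer_instance

def pvWitness_NumFrames : Int × Int × Int × Bool × Bool := (100, 10, 25, false, false)

-- On non-flush, non-snip inputs whose sample count makes the base frame count negative
-- (num_samples + window_shift//2 < 0), A returns that negative frame count; B returns 0,
-- the intended value, since a frame count cannot be negative.
def D_NumFrames (num_samples : Int) (window_shift : Int) (window_size : Int) (snip_edges : Bool) (flush : Bool) : Prop :=
  snip_edges = false ∧ flush = false ∧ num_samples + PySem.Int.floordiv window_shift 2 < 0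
instance (num_samples : Int) (window_shift : Int) (window_size : Int) (snip_edges : Bool) (flush : Bool) : Decidable (D_NumFrames num_samples window_shift window_size snip_edges flush) := by unfold D_NumFrames; infer_instance

def Spec_NumFrames (num_samples : Int) (window_shift : Int) (window_size : Int) (snip_edges : Bool) (flush : Bool) (out : Int) : Prop := ¬ D_NumFrames num_samples window_shift window_size snip_edges flush → out = NumFrames_alt num_samples window_shift window_size snip_edges flush
instance (num_samples : Int) (window_shift : Int) (window_size : Int) (snip_edges : Bool) (flush : Bool) (out : Int) : Decidable (Spec_NumFrames num_samples window_shift window_size snip_edges flush out) := by unfold Spec_NumFrames; infer_instance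

def pvDiffWitness_NumFrames : Int × Int × Int × Bool × Bool := (-100, 10, 25, false, false)
def pvDiffWitnessOut_NumFrames : Int × Int := (-10, 0)

-- ===== CLAIM (what is proved, stated in full; the proofs are below) =====
def Claim_unchanged_NumFrames : Prop := ∀ (num_samples : Int) (window_shift : Int) (window_size : Int) (snip_edges : Bool) (flush : Bool), Dom_NumFrames num_samples window_shift window_size snip_edges flush → Pre_NumFrames num_samples window_shift window_size snip_edges flush → Spec_NumFrames num_samples window_shift window_size snip_edges flush (NumFrames num_samples window_shift window_size snip_edges flush)
def Claim_changed_NumFrames : Prop := Dom_NumFrames (pvDiffWitness_NumFrames.1) (pvDiffWitness_NumFrames.2.1) (pvDiffWitness_NumFrames.2.2.1) (pvDiffWitness_NumFrames.2.2.2.1) (pvDiffWitness_NumFrames.2.2.2.2) ∧ Pre_NumFrames (pvDiffWitness_NumFrames.1) (pvDiffWitness_NumFrames.2.1) (pvDiffWitness_NumFrames.2.2.1) (pvDiffWitness_NumFrames.2.2.2.1) (pvDiffWitness_NumFrames.2.2.2.2) ∧ D_NumFrames (pvDiffWitness_NumFrames.1) (pvDiffWitness_NumFrames.2.1) (pvDiffWitness_NumFrames.2.2.1)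 (pvDiffWitness_NumFrames.2.2.2.1) (pvDiffWitness_NumFrames.2.2.2.2) ∧ NumFrames (pvDiffWitness_NumFrames.1) (pvDiffWitness_NumFrames.2.1) (pvDiffWitness_NumFrames.2.2.1) (pvDiffWitness_NumFrames.2.2.2.1) (pvDiffWitness_NumFrames.2.2.2.2) = pvDiffWitnessOut_NumFrames.1 ∧ NumFrames_alt (pvDiffWitness_NumFrames.1) (pvDiffWitness_NumFrames.2.1) (pvDiffWitness_NumFrames.2.2.1) (pvDiffWitness_NumFrames.2.2.2.1) (pvDiffWitness_NumFrames.2.2.2.2) = pvDiffWitnessOut_NumFrames.2 ∧ pvDiffWitnessOut_NumFrames.1 ≠ pvDiffWitnessOut_NumFrames.2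
def Claim_exact_NumFrames : Prop := ∀ (num_samples : Int) (window_shift : Int) (window_size : Int) (snip_edges : Bool) (flush : Bool), Dom_NumFrames num_samples window_shift window_size snip_edges flush → Pre_NumFrames num_samples window_shift window_size snip_edges flush → D_NumFrames num_samples window_shift window_size snip_edges flush → NumFrames num_samples window_shift window_size snip_edges flush ≠ NumFrames_alt num_samples window_shift window_size snip_edges flush

-- ===== LEMMAS AND PROOFS =====

-- closed form of A's loop for a positive shift
theorem numFramesLoop_pos (s sh : Int) (hsh : 0 < sh) :
    ∀ (fuel : Nat) (n e : Int), n.toNat ≤ fuel →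
      NumFramesLoop s sh fuel n e =
        if n ≤ 0 ∨ e ≤ s then n else max 0 (n + PySem.Int.floordiv (s - e) sh) := by
  intro fuel
  induction fuel with
  | zero =>
    intro n e hf
    have hn : n ≤ 0 := by omega
    simp [NumFramesLoop, hn]
  | succ k ih =>
    intro n e hf
    by_cases hc : n > 0 ∧ e > s
    · have hrec : NumFramesLoop s sh (k+1) n e = NumFramesLoop s sh k (n-1) (e-sh) := by
        simp [NumFramesLoop, hc]
      rw [hrec, ih (n-1) (e-sh) (by omega)]
      have hns : ¬ (n ≤ 0 ∨ e ≤ s) := by omega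
      rw [if_neg hns]
      by_cases h2 : (n - 1 ≤ 0 ∨ e - sh ≤ s)
      · rw [if_pos h2]
        rcases h2 with h2 | h2
        · -- n = 1
          have hn1 : n = 1 := by omega
          by_cases h3 : e - sh ≤ s
          · have hd : PySem.Int.floordiv (s - e) sh = -1 := by
              rw [PySem.Int.floordiv_eq_iff_of_pos hsh]; constructor <;> nlinarith [hc.2]
            omega
          · have hd : PySem.Int.floordiv (s - e) sh < -1 := by
              rw [PySem.Int.floordiv_lt_iff_lt_mul hsh]; nlinarith
            omega
        · have hd : PySem.Int.floordiv (s - e) sh = -1 := by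
            rw [PySem.Int.floordiv_eq_iff_of_pos hsh]; constructor <;> nlinarith [hc.2]
          omega
      · rw [if_neg h2]
        have hstep : PySem.Int.floordiv (s - (e - sh)) sh = PySem.Int.floordiv (s - e) sh + 1 := by
          simp only [PySem.Int.floordiv_eq_ediv_of_pos hsh]
          have : s - (e - sh) = (s - e) + 1 * sh := by ring
          rw [this, Int.add_mul_ediv_right _ _ (by omega : sh ≠ 0)]
        rw [hstep]; omega
    · have : NumFramesLoop s sh (k+1) n e = n := by simp [NumFramesLoop, hc]
      rw [this, if_pos (by omega)]

-- ===== VERDICT (by name: the statement is the Claim_ definition above) =====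
theorem NumFrames_spec : Claim_unchanged_NumFrames := by
  intro ns sh ws snip flush _hdom hpre
  unfold Spec_NumFrames
  intro hnd
  unfold NumFrames NumFrames_alt FirstSampleOfFrame
  cases snip with
  | true => simp
  | false =>
    simp only [Bool.false_eq_true, if_false]
    set n : Int := PySem.Int.floordiv (ns + PySem.Int.floordiv sh 2) sh with hn
    cases flush with
    | true => simp
    | false =>
      simp only [Bool.false_eq_true, if_false]
      have hpos : 0 < sh := by
        rcases hpre.2 with h | h | h
        · exact h
        · exact absurd h (by simp)
        · exact absurd h (by simp)
      have hnneg : 0 ≤ ns + PySem.Int.floordiv sh 2 := by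
        unfold D_NumFrames at hnd; push_neg at hnd
        exact hnd rfl rfl
      have hn0 : 0 ≤ n := by
        rw [hn, PySem.Int.floordiv_eq_ediv_of_pos hpos]
        exact Int.ediv_nonneg hnneg (by omega)
      set e : Int := sh * (n - 1) + PySem.Int.floordiv sh 2 - PySem.Int.floordiv ws 2 + ws with he
      set base : Int := ns - ws + PySem.Int.floordiv ws 2 - PySem.Int.floordiv sh 2 with hbase
      set fit : Int := 1 + PySem.Int.floordiv base sh with hfit
      show NumFramesLoop ns sh n.toNat n (sh * (n - 1) + PySem.Int.floordiv sh 2 - PySem.Int.floordiv ws 2 + ws) = max 0 (min n fit)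
      rw [show sh * (n - 1) + PySem.Int.floordiv sh 2 - PySem.Int.floordiv ws 2 + ws = e from he.symm,
          numFramesLoop_pos ns sh hpos n.toNat n e (le_refl _)]
      have hshift : PySem.Int.floordiv (ns - e) sh = PySem.Int.floordiv base sh - (n - 1) := by
        simp only [PySem.Int.floordiv_eq_ediv_of_pos hpos]
        have : ns - e = base + sh * (-(n - 1)) := by rw [he, hbase]; ring
        rw [this, Int.add_mul_ediv_left _ _ (by omega : sh ≠ 0)]; ring
      by_cases hes : e ≤ ns
      · rw [if_pos (Or.inr hes)]
        -- frame n-1 fits, so fit ≥ n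
        have hle : n - 1 ≤ PySem.Int.floordiv base sh := by
          rw [PySem.Int.le_floordiv_iff_mul_le hpos]
          have : (n - 1) * sh = sh * (n - 1) := by ring
          rw [this]; omega
        omega
      · push_neg at hes
        by_cases hz : n ≤ 0
        · rw [if_pos (Or.inl hz)]
          have hlt : PySem.Int.floordiv base sh < n - 1 := by
            rw [PySem.Int.floordiv_lt_iff_lt_mul hpos]; nlinarith
          omega
        · rw [if_neg (by omega : ¬ (n ≤ 0 ∨ e ≤ ns)), hshift]
          have hlt : PySem.Int.floordiv base sh < n - 1 := by
            rw [PySem.Int.floordiv_lt_iff_lt_mul hpos]; nlinarith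
          omega

theorem NumFrames_changed : Claim_changed_NumFrames := by unfold Claim_changed_NumFrames; decide

theorem NumFrames_tight : Claim_exact_NumFrames := by
  intro ns sh ws snip flush _hdom hpre hd
  obtain ⟨hsnip, hflush, hneg⟩ := hd
  subst hsnip; subst hflush
  have hpos : 0 < sh := by
    rcases hpre.2 with h | h | h
    · exact h
    · exact absurd h (by simp)
    · exact absurd h (by simp)
  unfold NumFrames NumFrames_alt
  simp only [Bool.false_eq_true, if_false]
  set n : Int := PySem.Int.floordiv (ns + PySem.Int.floordiv sh 2) sh with hn
  have hnneg : n < 0 := by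
    rw [hn, PySem.Int.floordiv_lt_iff_lt_mul hpos]
    omega
  have hfuel : n.toNat = 0 := by omega
  show NumFramesLoop ns sh n.toNat n _ ≠ max 0 (min n _)
  rw [hfuel]
  show n ≠ max 0 (min n _)
  have : 0 ≤ max 0 (min n (1 + PySem.Int.floordiv (ns - ws + PySem.Int.floordiv ws 2 - PySem.Int.floordiv sh 2) sh)) := le_max_left _ _
  omega
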